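-- pv_equiv track=rewrite | github.com/rlafiddn45/Algorithm | Programmers/learn/courses/30/lessons/64061.py | solution
-- ===== SOURCE A (Python) =====
-- def solution(board, moves):
--     answer = 0
--     dolls = []
--     for j in range(len(board[0])):
--         temp = []
--         for i in range(len(board) - 1, -1, -1):
--             if board[i][j] != 0:
--                 temp.append(board[i][j])
--         dolls.append(temp)
--     stack = []
--     for move in moves:
--         n = move - 1
--         if dolls[n]:
--             d = dolls[n].pop()
--             if stack:
--                 if stack[-1] == d:
--                     stack.pop()
--                     answer += 2
--                 else:
--                     stack.append(d)
--             else: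
--                 stack.append(d)
--     return answer
-- ===== SOURCE B (Python) =====
-- def solution(board, moves):
--     grid = [row[:] for row in board]
--     answer = 0
--     stack = []
--     for move in moves:
--         j = move - 1
--         for i in range(len(grid)):
--             d = grid[i][j]
--             if d != 0:
--                 grid[i][j] = 0
--                 if stack and stack[-1] == d:
--                     stack.pop()
--                     answer += 2
--                 else:
--                     stack.append(d)
--                 break
--     return answer
-- ===== Notes on version B (the rewrite author's own statement) =====
-- stated objective: alternative
-- what changed: Instead of precomputing per-column doll stacks and popping from them, B works on a defensive copy of the board and, for each move, scans that column top-down for the first non-zero cell, takes it and zeroes it, feeding the doll into the same cancel-stack.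
-- outside the precondition, e.g. on solution([[1], [3, 1]], [0, 0]): A returns 0, B returns 2
import Mathlib
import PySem

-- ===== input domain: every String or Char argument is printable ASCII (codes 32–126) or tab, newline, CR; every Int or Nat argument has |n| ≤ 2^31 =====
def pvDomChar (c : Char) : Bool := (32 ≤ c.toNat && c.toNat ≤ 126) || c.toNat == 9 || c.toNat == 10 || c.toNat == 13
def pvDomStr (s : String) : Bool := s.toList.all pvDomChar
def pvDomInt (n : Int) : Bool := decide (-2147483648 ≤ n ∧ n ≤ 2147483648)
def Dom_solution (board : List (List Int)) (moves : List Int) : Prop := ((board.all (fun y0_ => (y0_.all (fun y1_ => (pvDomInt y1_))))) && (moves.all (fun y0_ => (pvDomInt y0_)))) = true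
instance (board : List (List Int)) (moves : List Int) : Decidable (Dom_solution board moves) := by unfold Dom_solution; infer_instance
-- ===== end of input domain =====

-- B replaces A's precomputed per-column doll stacks by on-demand top-down column scans of a
-- defensive board copy (alternative decomposition, same answer-stack; return value only — neither
-- program mutates its arguments).

-- ===== PORT A =====
-- temp for one column j: bottom-to-top nonzero cells
def buildTemp (board : List (List Int)) (j : Int) : List Int :=
  (PySem.List.pyRange ((board.length : Int) - 1) (-1) (-1)).foldl
    (fun temp i =>
      if PySem.List.pyGetD (PySem.List.pyGetD board i []) j 0 ≠ 0 then
        temp ++ [PySem.List.pyGetD (PySem.List.pyGetD board i []) j 0]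
      else temp) []

-- body of A's 'for move in moves' loop; state = (answer, dolls, stack)
def stepA (st : Int × List (List Int) × List Int) (move : Int) :
    Int × List (List Int) × List Int :=
  let answer := st.1
  let dolls := st.2.1
  let stack := st.2.2
  let n := move - 1
  let col := PySem.List.pyGetD dolls n []
  if col = [] then (answer, dolls, stack)
  else
    let d := col.getLastD 0
    let dolls' := PySem.List.pySetD dolls n col.dropLast
    if stack.getLast? = some d then (answer + 2, dolls', stack.dropLast)
    else (answer, dolls', stack ++ [d])

def solution (board : List (List Int)) (moves : List Int) : Int :=
  let dolls := (PySem.List.pyRange 0 ((PySem.List.pyGetD board 0 []).length : Int) 1).foldl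
    (fun acc j => acc ++ [buildTemp board j]) []
  (moves.foldl stepA (0, dolls, [])).1

-- ===== PORT B =====
-- scan rows top-down for the first non-zero cell in column j; zero it
def pick (rows : List (List Int)) (j : Int) : Option (Int × List (List Int)) :=
  match rows with
  | [] => none
  | r :: rs =>
    if PySem.List.pyGetD r j 0 ≠ 0 then
      some (PySem.List.pyGetD r j 0, PySem.List.pySetD r j 0 :: rs)
    else (pick rs j).map (fun p => (p.1, r :: p.2))

-- body of B's 'for move in moves' loop; state = (answer, grid, stack)
def stepB (st : Int × List (List Int) × List Int) (move : Int) :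
    Int × List (List Int) × List Int :=
  let answer := st.1
  let grid := st.2.1
  let stack := st.2.2
  match pick grid (move - 1) with
  | none => (answer, grid, stack)
  | some (d, grid') =>
    if stack.getLast? = some d then (answer + 2, grid', stack.dropLast)
    else (answer, grid', stack ++ [d])

def solution_alt (board : List (List Int)) (moves : List Int) : Int :=
  (moves.foldl stepB (0, board, [])).1

-- ===== PRECONDITION & SPEC =====
-- Pre_ excludes: the empty board and boards whose rows are shorter than the first row (A raises
-- IndexError there), moves whose index move-1 falls outside Python's index range of the column
-- list (IndexError), and ragged boards with over-long rows, where A reads columns by the first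
-- row's width while a negative move makes B scan each row's own last cells.
def Pre_solution (board : List (List Int)) (moves : List Int) : Prop :=
  board ≠ [] ∧ (∀ r ∈ board, r.length = board.headI.length) ∧
    ∀ m ∈ moves, PySem.Raise.InRange board.headI.length (m - 1)
instance (board : List (List Int)) (moves : List Int) : Decidable (Pre_solution board moves) := by
  unfold Pre_solution; infer_instance
def pvWitness_solution : List (List Int) × List Int := ([[0, 1], [2, 3]], [1, 2, 2])

def Spec_solution (board : List (List Int)) (moves : List Int) (out : Int) : Prop := out = solution_alt board moves
instance (board : List (List Int)) (moves : List Int) (out : Int) : Decidable (Spec_solution board moves out) := by unfold Spec_solution; infer_instance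

-- ===== CLAIM (what is proved, stated in full; the proofs are below) =====
def Claim_equal_solution : Prop := ∀ (board : List (List Int)) (moves : List Int), Dom_solution board moves → Pre_solution board moves → Spec_solution board moves (solution board moves)

-- ===== LEMMAS AND PROOFS =====

-- the nonzero cells of column j, top-down
def colL (G : List (List Int)) (j : Nat) : List Int :=
  (G.map (fun r => r.getD j 0)).filter (fun v => v ≠ 0)

-- Python's normalisation of an in-range (possibly negative) index
def pyNorm (c : Nat) (i : Int) : Nat := if 0 ≤ i then i.toNat else (i + c).toNat

lemma pyNorm_lt {c : Nat} {i : Int} (h : PySem.Raise.InRange c i) : pyNorm c i < c := by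
  obtain ⟨h1, h2⟩ := h
  unfold pyNorm
  split <;> omega

lemma pyGetD_norm {α : Type} (xs : List α) (i : Int) (d : α)
    (h : PySem.Raise.InRange xs.length i) :
    PySem.List.pyGetD xs i d = xs.getD (pyNorm xs.length i) d := by
  obtain ⟨h1, h2⟩ := h
  by_cases hi : 0 ≤ i
  · rw [PySem.List.pyGetD_eq_getElem xs d hi h2]
    have hj : pyNorm xs.length i = i.toNat := by unfold pyNorm; simp [hi]
    rw [hj, List.getD_eq_getElem xs d (by omega)]
  · have hk : i = -(((-i).toNat : Nat) : Int) := by omega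
    rw [hk, PySem.List.pyGetD_neg_natCast xs (-i).toNat d (by omega) (by omega), ← hk]
    have hj : pyNorm xs.length i = xs.length - (-i).toNat := by unfold pyNorm; simp [hi]; omega
    rw [hj, List.getD_eq_getElem xs d (by omega)]

lemma pySetD_norm {α : Type} (xs : List α) (i : Int) (v : α)
    (h : PySem.Raise.InRange xs.length i) :
    PySem.List.pySetD xs i v = xs.set (pyNorm xs.length i) v := by
  obtain ⟨h1, h2⟩ := h
  unfold PySem.List.pySetD PySem.List.pySet? PySem.List.pyIdx? pyNorm
  by_cases hi : 0 ≤ i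
  · simp only [if_pos hi, if_pos h2, Option.map_some, Option.getD_some]
  · simp only [if_neg hi, if_pos h1, Option.map_some, Option.getD_some]
    congr 1
    omega

lemma colL_cons (r : List Int) (rs : List (List Int)) (j : Nat) :
    colL (r :: rs) j
      = if r.getD j 0 = 0 then colL rs j else r.getD j 0 :: colL rs j := by
  simp only [colL, List.map_cons, List.filter_cons]
  by_cases h : r.getD j 0 = 0
  · simp
  · simp

lemma foldl_append_if_ne (l : List Int) (g : Int → Int) (acc : List Int) :
    l.foldl (fun t i => if g i ≠ 0 then t ++ [g i] else t) acc
      = acc ++ (l.map g).filter (fun v => v ≠ 0) := by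
  induction l generalizing acc with
  | nil => simp
  | cons x xs ih =>
    rw [List.foldl_cons]
    by_cases h : g x = 0
    · rw [if_neg (by simpa using h), ih acc]
      simp [h]
    · rw [if_pos (by simpa using h), ih (acc ++ [g x])]
      simp [h]

lemma buildTemp_eq (board : List (List Int)) (j : Nat) :
    buildTemp board (j : Int) = (colL board j).reverse := by
  unfold buildTemp colL
  rw [foldl_append_if_ne _ (fun i => PySem.List.pyGetD (PySem.List.pyGetD board i []) (j : Int) 0)]
  rw [PySem.List.pyRange_neg_one_eq_reverse]
  have h0 : (-1 : Int) + 1 = 0 := by norm_num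
  have h1 : (board.length : Int) - 1 + 1 = (board.length : Int) := by ring
  rw [h0, h1, List.map_reverse, List.filter_reverse]
  have hmm : (PySem.List.pyRange 0 (board.length : Int) 1).map
      (fun i => PySem.List.pyGetD (PySem.List.pyGetD board i []) (j : Int) 0)
      = ((PySem.List.pyRange 0 (board.length : Int) 1).map
          (fun i => PySem.List.pyGetD board i [])).map
          (fun r => PySem.List.pyGetD r (j : Int) 0) := by
    rw [List.map_map]
    rfl
  rw [hmm, PySem.List.map_pyGetD_pyRange_zero']
  simp

lemma dolls_init (board : List (List Int)) (c : Nat) :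
    (PySem.List.pyRange 0 (c : Int) 1).foldl (fun acc j => acc ++ [buildTemp board j]) []
      = (List.range c).map (fun j => (colL board j).reverse) := by
  rw [PySem.List.foldl_append_singleton_eq_map, PySem.List.pyRange_zero_nat, List.map_map]
  exact List.map_congr_left (fun j _ => buildTemp_eq board j)

lemma getD_set_self (r : List Int) (j : Nat) (v d : Int) (h : j < r.length) :
    (r.set j v).getD j d = v := by
  rw [List.getD_eq_getElem _ _ (by simpa using h)]
  simp

lemma getD_set_ne (r : List Int) (j j' : Nat) (v d : Int) (hne : j ≠ j') :
    (r.set j v).getD j' d = r.getD j' d := by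
  rw [List.getD_eq_getElem?_getD, List.getD_eq_getElem?_getD, List.getElem?_set_ne hne]

lemma pick_spec (c : Nat) (i : Int) (h : PySem.Raise.InRange c i) :
    ∀ (G : List (List Int)), (∀ r ∈ G, r.length = c) →
      (colL G (pyNorm c i) = [] → pick G i = none) ∧
      (∀ d ds, colL G (pyNorm c i) = d :: ds →
        ∃ G', pick G i = some (d, G') ∧ (∀ r ∈ G', r.length = c) ∧
          colL G' (pyNorm c i) = ds ∧
          ∀ j' : Nat, j' ≠ pyNorm c i → colL G' j' = colL G j') := by
  intro G hG
  induction G with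
  | nil =>
    refine ⟨fun _ => rfl, fun d ds h' => ?_⟩
    simp [colL] at h'
  | cons r rs ih =>
    have hr : r.length = c := hG r (by simp)
    have hrs : ∀ x ∈ rs, x.length = c := fun x hx => hG x (List.mem_cons_of_mem _ hx)
    obtain ⟨ih1, ih2⟩ := ih hrs
    have hg : PySem.List.pyGetD r i 0 = r.getD (pyNorm c i) 0 := by
      have h2 := pyGetD_norm r i 0 (by rw [hr]; exact h)
      rwa [hr] at h2
    have hset : PySem.List.pySetD r i 0 = r.set (pyNorm c i) 0 := by
      have h2 := pySetD_norm r i 0 (by rw [hr]; exact h)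
      rwa [hr] at h2
    have hjlt : pyNorm c i < r.length := by rw [hr]; exact pyNorm_lt h
    by_cases hz : r.getD (pyNorm c i) 0 = 0
    · have hpick : pick (r :: rs) i = (pick rs i).map (fun p => (p.1, r :: p.2)) := by
        simp only [pick]
        rw [hg, if_neg (not_not_intro hz)]
      constructor
      · intro hcol
        rw [colL_cons, if_pos hz] at hcol
        rw [hpick, ih1 hcol]
        rfl
      · intro d ds hcol
        rw [colL_cons, if_pos hz] at hcol
        obtain ⟨G', hp, hlen, hcj, hoth⟩ := ih2 d ds hcol
        refine ⟨r :: G', by rw [hpick, hp]; rfl, ?_, ?_, ?_⟩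
        · intro x hx
          rcases List.mem_cons.mp hx with h' | h'
          · rw [h']; exact hr
          · exact hlen x h'
        · rw [colL_cons, if_pos hz, hcj]
        · intro j' hj'
          rw [colL_cons, colL_cons, hoth j' hj']
    · have hpick : pick (r :: rs) i
          = some (r.getD (pyNorm c i) 0, r.set (pyNorm c i) 0 :: rs) := by
        simp only [pick]
        rw [hg, hset, if_pos hz]
      constructor
      · intro hcol
        rw [colL_cons, if_neg hz] at hcol
        simp at hcol
      · intro d ds hcol
        rw [colL_cons, if_neg hz] at hcol
        obtain ⟨hd, hds⟩ := List.cons_eq_cons.mp hcol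
        refine ⟨r.set (pyNorm c i) 0 :: rs, by rw [hpick, hd], ?_, ?_, ?_⟩
        · intro x hx
          rcases List.mem_cons.mp hx with h' | h'
          · rw [h']; simpa using hr
          · exact hrs x h'
        · rw [colL_cons, if_pos (getD_set_self r _ 0 0 hjlt), ← hds]
        · intro j' hj'
          rw [colL_cons, colL_cons, getD_set_ne r _ j' 0 0 (fun h' => hj' h'.symm)]

lemma set_map_range {α : Type} (c : Nat) (f : Nat → α) (j : Nat) (v : α) (_hj : j < c) :
    ((List.range c).map f).set j v
      = (List.range c).map (fun k => if k = j then v else f k) := by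
  apply List.ext_getElem
  · simp
  · intro n h1 h2
    simp only [List.getElem_set, List.getElem_map, List.getElem_range]
    simp only [List.length_set, List.length_map, List.length_range] at h1
    by_cases hn : j = n
    · simp [hn]
    · simp [hn, Ne.symm hn]

lemma D_getD (c : Nat) (G : List (List Int)) (j : Nat) (hj : j < c) :
    ((List.range c).map (fun k => (colL G k).reverse)).getD j [] = (colL G j).reverse := by
  rw [List.getD_eq_getElem _ _ (by simp [hj])]
  simp

lemma step_rel (c : Nat) (m a : Int) (s : List Int) (G : List (List Int))
    (hm : PySem.Raise.InRange c (m - 1)) (hG : ∀ r ∈ G, r.length = c) :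
    stepA (a, (List.range c).map (fun k => (colL G k).reverse), s) m
      = ((stepB (a, G, s) m).1,
         (List.range c).map (fun k => (colL (stepB (a, G, s) m).2.1 k).reverse),
         (stepB (a, G, s) m).2.2)
    ∧ ∀ r ∈ (stepB (a, G, s) m).2.1, r.length = c := by
  have hjlt : pyNorm c (m - 1) < c := pyNorm_lt hm
  have hDlen : ((List.range c).map (fun k => (colL G k).reverse)).length = c := by simp
  have hcolget : PySem.List.pyGetD ((List.range c).map (fun k => (colL G k).reverse)) (m - 1) []
      = (colL G (pyNorm c (m - 1))).reverse := by
    rw [pyGetD_norm _ _ _ (by rw [hDlen]; exact hm), hDlen]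
    exact D_getD c G _ hjlt
  obtain ⟨ps1, ps2⟩ := pick_spec c (m - 1) hm G hG
  cases hcol : colL G (pyNorm c (m - 1)) with
  | nil =>
    have hpick := ps1 hcol
    unfold stepA stepB
    dsimp only
    rw [hpick]
    simp only [hcolget, hcol, List.reverse_nil]
    exact ⟨rfl, hG⟩
  | cons d ds =>
    obtain ⟨G', hp, hlen, hcj, hoth⟩ := ps2 d ds hcol
    have hset : PySem.List.pySetD ((List.range c).map (fun k => (colL G k).reverse)) (m - 1)
        ds.reverse = (List.range c).map (fun k => (colL G' k).reverse) := by
      rw [pySetD_norm _ _ _ (by rw [hDlen]; exact hm), hDlen,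
        set_map_range c _ _ _ hjlt]
      refine List.map_congr_left (fun k hk => ?_)
      by_cases hkj : k = pyNorm c (m - 1)
      · rw [if_pos hkj, hkj, hcj]
      · rw [if_neg hkj, hoth k hkj]
    unfold stepA stepB
    dsimp only
    rw [hp]
    simp only [hcolget, hcol, List.reverse_cons]
    rw [if_neg (by simp), List.getLastD_eq_getLast?, List.getLast?_concat,
      List.dropLast_concat, hset]
    constructor
    · by_cases hst : s.getLast? = some d
      · simp only [Option.getD_some, if_pos hst]
      · simp only [Option.getD_some, if_neg hst]
    · by_cases hst : s.getLast? = some d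
      · rw [if_pos hst]; exact hlen
      · rw [if_neg hst]; exact hlen

lemma loop_eq (c : Nat) : ∀ (moves : List Int) (a : Int) (s : List Int) (G : List (List Int)),
    (∀ m ∈ moves, PySem.Raise.InRange c (m - 1)) → (∀ r ∈ G, r.length = c) →
    moves.foldl stepA (a, (List.range c).map (fun j => (colL G j).reverse), s)
      = (fun st : Int × List (List Int) × List Int =>
          (st.1, (List.range c).map (fun j => (colL st.2.1 j).reverse), st.2.2))
        (moves.foldl stepB (a, G, s)) ∧
    (∀ r ∈ (moves.foldl stepB (a, G, s)).2.1, r.length = c) := by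
  intro moves
  induction moves with
  | nil => exact fun a s G _ hG => ⟨rfl, hG⟩
  | cons m ms ih =>
    intro a s G hmv hG
    have hm := hmv m (List.mem_cons_self)
    obtain ⟨e1, e2⟩ := step_rel c m a s G hm hG
    rw [List.foldl_cons, List.foldl_cons, e1]
    have hms : ∀ x ∈ ms, PySem.Raise.InRange c (x - 1) :=
      fun x hx => hmv x (List.mem_cons_of_mem _ hx)
    have := ih (stepB (a, G, s) m).1 (stepB (a, G, s) m).2.2 (stepB (a, G, s) m).2.1 hms e2
    simpa using this

-- ===== VERDICT (by name: the statement is the Claim_ definition above) =====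
theorem solution_spec : Claim_equal_solution := by
  intro board moves _hdom hpre
  obtain ⟨hne, hrect, hmv⟩ := hpre
  unfold Spec_solution solution solution_alt
  obtain ⟨r, rest, rfl⟩ : ∃ r rest, board = r :: rest := by
    cases board with
    | nil => exact absurd rfl hne
    | cons r rest => exact ⟨r, rest, rfl⟩
  have hc : PySem.List.pyGetD (r :: rest) 0 [] = r := PySem.List.pyGetD_zero_cons r rest []
  rw [hc]
  dsimp only
  have hloop := loop_eq r.length moves 0 [] (r :: rest) (by simpa using hmv) (by simpa using hrect)
  rw [dolls_init (r :: rest) r.length, hloop.1]
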